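-- pv_equiv track=rewrite | github.com/zoofighter/writer-editor-agent | src/utils/code_validator.py | check_indentation_consistency
-- ===== SOURCE A (Python) =====
-- from typing import Tuple, List, Dict, Any, Optional
--
-- def check_indentation_consistency(code: str) -> Tuple[bool, Optional[str]]:
--     """
--     Check if code uses consistent indentation (spaces vs tabs).
--
--     Args:
--         code: Python code string to check
--
--     Returns:
--         Tuple of (is_consistent, warning_message)
--
--     Example:
--         >>> code = "def foo():\\n    x = 1\\n\\ty = 2"  # Mixed spaces and tabs
--         >>> is_consistent, warning = PythonCodeValidator.check_indentation_consistency(code)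
--         >>> assert is_consistent is False
--     """
--     lines = code.split('\n')
--     has_spaces = False
--     has_tabs = False
--
--     for i, line in enumerate(lines, start=1):
--         if line and line[0] in (' ', '\t'):
--             if line[0] == ' ':
--                 has_spaces = True
--             elif line[0] == '\t':
--                 has_tabs = True
--
--             if has_spaces and has_tabs:
--                 return False, f"Mixed spaces and tabs detected (problematic around line {i})"
--
--     return True, None
-- ===== SOURCE B (Python) =====
-- from typing import Tuple, Optional
--
-- def check_indentation_consistency(code: str) -> Tuple[bool, Optional[str]]:
--     lines = code.split('\n')
--     first_space = next((i for i, line in enumerate(lines, 1) if line and line[0] == ' '), None)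
--     first_tab = next((i for i, line in enumerate(lines, 1) if line and line[0] == '\t'), None)
--     if first_space is not None and first_tab is not None:
--         n = max(first_space, first_tab)
--         return False, f"Mixed spaces and tabs detected (problematic around line {n})"
--     return True, None
-- ===== Notes on version B (the rewrite author's own statement) =====
-- stated objective: alternative
-- what changed: Replaces the per-line flag-accumulating early-exit loop by two independent find-first searches (first line starting with a space, first starting with a tab), combining them with max to recover the line where the mix completes.
import Mathlib
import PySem

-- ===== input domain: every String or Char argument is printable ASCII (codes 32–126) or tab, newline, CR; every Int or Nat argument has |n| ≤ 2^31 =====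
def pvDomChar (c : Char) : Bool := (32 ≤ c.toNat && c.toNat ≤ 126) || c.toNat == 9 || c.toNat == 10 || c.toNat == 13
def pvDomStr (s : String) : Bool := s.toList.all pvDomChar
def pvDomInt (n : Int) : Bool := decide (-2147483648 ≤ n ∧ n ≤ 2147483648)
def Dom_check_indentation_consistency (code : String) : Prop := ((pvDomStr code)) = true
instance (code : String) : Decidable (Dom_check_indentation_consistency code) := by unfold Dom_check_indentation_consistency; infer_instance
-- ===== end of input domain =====

-- B finds the first space-led and first tab-led line independently and combines with max,
-- instead of A's flag-accumulating early-exit loop; objective: alternative decomposition.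

-- the f-string of both Pythons
def pvMsg (i : Int) : String :=
  "Mixed spaces and tabs detected (problematic around line " ++ PySem.Int.toStr i ++ ")"

-- ===== PORT A =====
-- A's loop: enumerate(lines, 1) with accumulated has_spaces/has_tabs flags, early return
def pvALoop : List (List Char) → Int → Bool → Bool → Bool × Option String
  | [], _, _, _ => (true, none)
  | line :: rest, i, hs, ht =>
    if line.head? = some ' ' ∨ line.head? = some '\t' then
      let hs' := if line.head? = some ' ' then true else hs
      let ht' := if line.head? = some '\t' then true else ht
      if hs' && ht' then (false, some (pvMsg i))
      else pvALoop rest (i + 1) hs' ht'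
    else pvALoop rest (i + 1) hs ht

def check_indentation_consistency (code : String) : Bool × Option String :=
  pvALoop (PySem.Chars.splitOn code.toList ['\n']) 1 false false

-- ===== PORT B =====
-- first 1-based index of a line whose first character is c (B's next(... enumerate(lines,1) ...))
def pvFirstIdx (c : Char) : List (List Char) → Int → Option Int
  | [], _ => none
  | line :: rest, i =>
    if line.head? = some c then some i else pvFirstIdx c rest (i + 1)

def check_indentation_consistency_alt (code : String) : Bool × Option String :=
  let lines := PySem.Chars.splitOn code.toList ['\n']
  match pvFirstIdx ' ' lines 1, pvFirstIdx '\t' lines 1 with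
  | some fs, some ft => (false, some (pvMsg (max fs ft)))
  | _, _ => (true, none)

-- ===== PRECONDITION & SPEC =====
def Spec_check_indentation_consistency (code : String) (out : Bool × Option String) : Prop := out = check_indentation_consistency_alt code
instance (code : String) (out : Bool × Option String) : Decidable (Spec_check_indentation_consistency code out) := by unfold Spec_check_indentation_consistency; infer_instance

-- ===== CLAIM (what is proved, stated in full; the proofs are below) =====
def Claim_equal_check_indentation_consistency : Prop := ∀ (code : String), Dom_check_indentation_consistency code → Spec_check_indentation_consistency code (check_indentation_consistency code)

-- ===== LEMMAS AND PROOFS =====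

theorem pvFirstIdx_le {c : Char} {lines : List (List Char)} {i j : Int}
    (h : pvFirstIdx c lines i = some j) : i ≤ j := by
  induction lines generalizing i with
  | nil => simp [pvFirstIdx] at h
  | cons l rest ih =>
    simp only [pvFirstIdx] at h
    split at h
    · simp at h; omega
    · have := ih h; omega

-- after has_spaces is set (and has_tabs not), A's loop just searches for the first tab line
theorem pvALoop_true_false (lines : List (List Char)) (i : Int) :
    pvALoop lines i true false =
      match pvFirstIdx '\t' lines i with
      | some j => (false, some (pvMsg j))
      | none => (true, none) := by
  induction lines generalizing i with
  | nil => simp [pvALoop, pvFirstIdx]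
  | cons l rest ih =>
    by_cases hsp : l.head? = some ' '
    · have ht : l.head? ≠ some '\t' := by simp [hsp]
      simp [pvALoop, pvFirstIdx, hsp, ih]
    · by_cases htb : l.head? = some '\t'
      · simp [pvALoop, pvFirstIdx, htb]
      · simp [pvALoop, pvFirstIdx, hsp, htb, ih]

-- symmetrically after has_tabs is set
theorem pvALoop_false_true (lines : List (List Char)) (i : Int) :
    pvALoop lines i false true =
      match pvFirstIdx ' ' lines i with
      | some j => (false, some (pvMsg j))
      | none => (true, none) := by
  induction lines generalizing i with
  | nil => simp [pvALoop, pvFirstIdx]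
  | cons l rest ih =>
    by_cases hsp : l.head? = some ' '
    · simp [pvALoop, pvFirstIdx, hsp]
    · by_cases htb : l.head? = some '\t'
      · simp [pvALoop, pvFirstIdx, htb, ih]
      · simp [pvALoop, pvFirstIdx, hsp, htb, ih]

theorem pvALoop_false_false (lines : List (List Char)) (i : Int) :
    pvALoop lines i false false =
      match pvFirstIdx ' ' lines i, pvFirstIdx '\t' lines i with
      | some fs, some ft => (false, some (pvMsg (max fs ft)))
      | _, _ => (true, none) := by
  induction lines generalizing i with
  | nil => simp [pvALoop, pvFirstIdx]
  | cons l rest ih =>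
    by_cases hsp : l.head? = some ' '
    · have ht : l.head? ≠ some '\t' := by simp [hsp]
      have step : pvALoop (l :: rest) i false false = pvALoop rest (i + 1) true false := by
        simp [pvALoop, hsp]
      have fsp : pvFirstIdx ' ' (l :: rest) i = some i := by simp [pvFirstIdx, hsp]
      have ftb : pvFirstIdx '\t' (l :: rest) i = pvFirstIdx '\t' rest (i + 1) := by
        simp [pvFirstIdx, ht]
      rw [step, pvALoop_true_false, fsp, ftb]
      cases h : pvFirstIdx '\t' rest (i + 1) with
      | none => simp
      | some j =>
        have hij : i + 1 ≤ j := pvFirstIdx_le h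
        have : max i j = j := by omega
        simp [this]
    · by_cases htb : l.head? = some '\t'
      · have step : pvALoop (l :: rest) i false false = pvALoop rest (i + 1) false true := by
          simp [pvALoop, htb]
        have ftb : pvFirstIdx '\t' (l :: rest) i = some i := by simp [pvFirstIdx, htb]
        have fsp : pvFirstIdx ' ' (l :: rest) i = pvFirstIdx ' ' rest (i + 1) := by
          simp [pvFirstIdx, hsp]
        rw [step, pvALoop_false_true, ftb, fsp]
        cases h : pvFirstIdx ' ' rest (i + 1) with
        | none => simp
        | some j =>
          have hij : i + 1 ≤ j := pvFirstIdx_le h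
          have : max j i = j := by omega
          simp [this]
      · simp [pvALoop, pvFirstIdx, hsp, htb, ih]

-- ===== VERDICT (by name: the statement is the Claim_ definition above) =====
theorem check_indentation_consistency_spec : Claim_equal_check_indentation_consistency := by
  intro code _
  unfold Spec_check_indentation_consistency check_indentation_consistency check_indentation_consistency_alt
  exact pvALoop_false_false _ 1
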